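-- pv_equiv track=rewrite | github.com/RideGreg/LeetCode | Python/sum-of-mutated-array-closest-to-target.py | findBestValue
-- ===== SOURCE A (Python) =====
-- def findBestValue(arr, target):
--     """
--     :type arr: List[int]
--     :type target: int
--     :rtype: int
--     """
--     def total(arr, v):
--         result = 0
--         for x in arr:
--             result += min(v, x)
--         return result
--
--     def check(arr, v, target):
--         return total(arr, v) >= target
--
--     left, right = 1, max(arr)
--     while left <= right:
--         mid = left + (right-left)//2
--         if check(arr, mid, target):
--             right = mid-1
--         else:
--             left = mid+1
--     return left-1 if target-total(arr, left-1) <= total(arr, left)-target else left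
-- ===== SOURCE B (Python) =====
-- def findBestValue(arr, target):
--     s = sorted(arr)
--     n = len(s)
--     mx = s[-1]
--
--     def tot(v):
--         # sum of min(v, x) = (sum of x < v) + v * (count of x >= v)
--         c, below = 0, 0
--         for x in s:
--             if x < v:
--                 c += 1
--                 below += x
--         return below + v * (n - c)
--
--     # Analytic scan over split positions of the sorted list: find the smallest
--     # v >= 1 with tot(v) >= target (mx+1 if none exists up to mx).
--     left = mx + 1
--     pre = 0   # sum of elements already passed (all < any candidate v)
--     lo = 1    # smallest candidate not yet ruled out
--     k = n     # number of elements still capped at v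
--     for x in s:
--         need = target - pre
--         v = max(lo, -(-need // k))   # smallest v >= lo with pre + v*k >= target
--         if v <= x:
--             left = v
--             break
--         pre += x
--         lo = max(lo, x + 1)
--         k -= 1
--     left = max(1, left)
--     return left - 1 if target - tot(left - 1) <= tot(left) - target else left
-- ===== Notes on version B (the rewrite author's own statement) =====
-- stated objective: faster
-- what changed: Replaces A's binary search over the value range [1, max(arr)] (each probe re-summing the whole array, ~log2(max) full passes) by one sort followed by a single analytic scan over split positions of the sorted array, solving pre + v*k >= target with one ceiling division per position; totals for the final tie-break are read off a below/above split in one pass.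
-- outside the precondition, e.g. on findBestValue([], 5): A raises ValueError, B raises IndexError
import Mathlib
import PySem

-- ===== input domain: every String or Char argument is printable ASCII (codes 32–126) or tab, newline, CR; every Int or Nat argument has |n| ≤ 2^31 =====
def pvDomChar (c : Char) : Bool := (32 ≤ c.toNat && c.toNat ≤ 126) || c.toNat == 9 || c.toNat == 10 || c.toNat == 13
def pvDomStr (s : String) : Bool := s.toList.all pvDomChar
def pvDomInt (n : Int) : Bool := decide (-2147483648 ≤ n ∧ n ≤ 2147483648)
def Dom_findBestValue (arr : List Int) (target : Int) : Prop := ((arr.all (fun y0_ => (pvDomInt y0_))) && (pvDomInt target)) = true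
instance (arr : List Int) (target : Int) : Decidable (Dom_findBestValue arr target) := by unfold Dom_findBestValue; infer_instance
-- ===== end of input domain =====

-- B replaces A's binary search over the value range by one sort plus an analytic scan
-- over split positions of the sorted array (measured faster by a constant factor; same result).

-- ===== PORT A =====
-- A's helper total(arr, v) = sum of min(v, x)
def pyTotal (arr : List Int) (v : Int) : Int :=
  arr.foldl (fun result x => result + min v x) 0

-- A's while-loop: left, right move by binary search until left > right
def bsLoop (arr : List Int) (target : Int) (left right : Int) : Int :=
  if _h : left ≤ right then
    let mid := left + PySem.Int.floordiv (right - left) 2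
    if target ≤ pyTotal arr mid then bsLoop arr target left (mid - 1)
    else bsLoop arr target (mid + 1) right
  else left
termination_by (right - left + 1).toNat
decreasing_by
  all_goals
    simp only [PySem.Int.floordiv_eq_ediv_of_pos (by omega : (0:Int) < 2)] at *
    omega

def findBestValue (arr : List Int) (target : Int) : Int :=
  match PySem.List.max? arr (fun x => x) with
  | none => 0   -- max([]) raises ValueError; excluded by Pre_
  | some mx =>
    let left := bsLoop arr target 1 mx
    if target - pyTotal arr (left - 1) ≤ pyTotal arr left - target then left - 1 else left

-- ===== PORT B =====
-- B's helper tot(v): one pass collecting (count, sum) of elements below v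
def altTot (s : List Int) (n : Int) (v : Int) : Int :=
  let cb := s.foldl (fun (cb : Int × Int) x => if x < v then (cb.1 + 1, cb.2 + x) else cb) (0, 0)
  cb.2 + v * (n - cb.1)

-- B's for-loop over the sorted list with break (dflt = value when no break fires)
def altScan (target : Int) (s : List Int) (pre lo k dflt : Int) : Int :=
  match s with
  | [] => dflt
  | x :: rest =>
    let need := target - pre
    let v := max lo (-(PySem.Int.floordiv (-need) k))
    if v ≤ x then v
    else altScan target rest (pre + x) (max lo (x + 1)) (k - 1) dflt

def findBestValue_alt (arr : List Int) (target : Int) : Int :=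
  let s := PySem.List.sorted arr (fun x => x) false
  let n : Int := s.length
  match PySem.List.pyGet? s (-1) with
  | none => 0   -- s[-1] raises IndexError on the empty list; excluded by Pre_
  | some mx =>
    let left := max 1 (altScan target s 0 1 n (mx + 1))
    if target - altTot s n (left - 1) ≤ altTot s n left - target then left - 1 else left

-- ===== PRECONDITION & SPEC =====
-- A raises ValueError (max of empty sequence) on []; Pre_ excludes exactly that.
def Pre_findBestValue (arr : List Int) (target : Int) : Prop := arr ≠ []
instance (arr : List Int) (target : Int) : Decidable (Pre_findBestValue arr target) := by
  unfold Pre_findBestValue; infer_instance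

def pvWitness_findBestValue : List Int × Int := ([4, 9, 3], 10)

def Spec_findBestValue (arr : List Int) (target : Int) (out : Int) : Prop := out = findBestValue_alt arr target
instance (arr : List Int) (target : Int) (out : Int) : Decidable (Spec_findBestValue arr target out) := by unfold Spec_findBestValue; infer_instance

-- ===== CLAIM (what is proved, stated in full; the proofs are below) =====
def Claim_equal_findBestValue : Prop := ∀ (arr : List Int) (target : Int), Dom_findBestValue arr target → Pre_findBestValue arr target → Spec_findBestValue arr target (findBestValue arr target)

-- ===== LEMMAS AND PROOFS =====

-- pyTotal as a map-sum
theorem pyTotal_foldl_shift (arr : List Int) (v a : Int) :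
    arr.foldl (fun result x => result + min v x) a = a + (arr.map (fun x => min v x)).sum := by
  induction arr generalizing a with
  | nil => simp
  | cons x t ih => simp [List.foldl_cons, ih]; ring

theorem pyTotal_eq_map_sum (arr : List Int) (v : Int) :
    pyTotal arr v = (arr.map (fun x => min v x)).sum := by
  simp [pyTotal, pyTotal_foldl_shift]

-- monotonicity of pyTotal in v
theorem pyTotal_mono (arr : List Int) {u v : Int} (h : u ≤ v) :
    pyTotal arr u ≤ pyTotal arr v := by
  simp only [pyTotal_eq_map_sum]
  induction arr with
  | nil => simp
  | cons x t ih =>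
    simp only [List.map_cons, List.sum_cons]
    have : min u x ≤ min v x := by omega
    omega

-- permutation invariance
theorem pyTotal_perm {s t : List Int} (h : s.Perm t) (v : Int) :
    pyTotal s v = pyTotal t v := by
  simp only [pyTotal_eq_map_sum]
  exact (h.map _).sum_eq

-- B's tot equals pyTotal
theorem altTot_foldl_char (s : List Int) (v : Int) (cb : Int × Int) :
    s.foldl (fun (cb : Int × Int) x => if x < v then (cb.1 + 1, cb.2 + x) else cb) cb
      = (cb.1 + ((s.filter (fun x => x < v)).length : Int),
         cb.2 + (s.filter (fun x => x < v)).sum) := by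
  induction s generalizing cb with
  | nil => simp
  | cons x t ih =>
    by_cases h : x < v <;> simp [List.foldl_cons, List.filter_cons, h, ih] <;> constructor <;> ring

theorem altTot_eq (s : List Int) (v : Int) :
    altTot s (s.length : Int) v = pyTotal s v := by
  simp only [altTot, altTot_foldl_char, pyTotal_eq_map_sum]
  induction s with
  | nil => simp
  | cons x t ih =>
    simp only [List.filter_cons, List.map_cons, List.sum_cons, List.length_cons] at *
    by_cases h : x < v
    · have hm : min v x = x := by omega
      simp [h, hm] at *
      push_cast
      omega
    · have hm : min v x = v := by omega
      simp [h, hm] at *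
      rw [← ih]; ring

theorem map_min_const (l : List Int) (v : Int) (h : ∀ y ∈ l, v ≤ y) :
    (l.map (fun y => min v y)).sum = v * (l.length : Int) := by
  induction l with
  | nil => simp
  | cons x t ih =>
    simp only [List.map_cons, List.sum_cons, List.length_cons]
    rw [min_eq_left (h x (by simp)), ih (fun y hy => h y (by simp [hy]))]
    push_cast; ring

-- the characterizing predicate of the value `left` both loops compute
def IsLeft (arr : List Int) (target mx v : Int) : Prop :=
  1 ≤ v ∧ v ≤ max (mx + 1) 1 ∧
  (∀ u, 1 ≤ u → u < v → pyTotal arr u < target) ∧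
  (v ≤ mx → target ≤ pyTotal arr v)

theorem IsLeft_unique {arr : List Int} {target mx v w : Int}
    (hv : IsLeft arr target mx v) (hw : IsLeft arr target mx w) : v = w := by
  have key : ∀ a b : Int, IsLeft arr target mx a → IsLeft arr target mx b → a < b → False := by
    intro a b ⟨ha1, ha2, ha3, ha4⟩ ⟨hb1, hb2, hb3, hb4⟩ hab
    have h1 := hb3 a ha1 hab
    by_cases hm : a ≤ mx
    · have := ha4 hm; omega
    · omega
  rcases lt_trichotomy v w with h | h | h
  · exact absurd (key v w hv hw h) (by simp)
  · exact h
  · exact absurd (key w v hw hv h) (by simp)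

theorem bsLoop_isLeft (arr : List Int) (target mx : Int)
    (hmax : ∀ y ∈ arr, y ≤ mx) :
    ∀ left right : Int, 1 ≤ left → right ≤ mx → left ≤ max (right + 1) 1 →
    (∀ u, 1 ≤ u → u < left → pyTotal arr u < target) →
    (∀ u, right < u → u ≤ mx → target ≤ pyTotal arr u) →
    IsLeft arr target mx (bsLoop arr target left right) := by
  intro left right
  induction left, right using bsLoop.induct arr target with
  | case1 left right hle mid hchk ih =>
    intro h1 h2 h3 h4 h5
    have hmid : left ≤ mid ∧ mid ≤ right := by
      simp only [mid, PySem.Int.floordiv_eq_ediv_of_pos (by omega : (0:Int) < 2)]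
      omega
    rw [bsLoop]
    simp only [dif_pos hle]
    rw [if_pos (show target ≤ pyTotal arr (left + PySem.Int.floordiv (right - left) 2) from hchk)]
    exact ih h1 (by omega) (by omega) h4
      (fun u hu hum => le_trans hchk (pyTotal_mono arr (by omega)))
  | case2 left right hle mid hchk ih =>
    intro h1 h2 h3 h4 h5
    have hmid : left ≤ mid ∧ mid ≤ right := by
      simp only [mid, PySem.Int.floordiv_eq_ediv_of_pos (by omega : (0:Int) < 2)]
      omega
    rw [bsLoop]
    simp only [dif_pos hle]
    rw [if_neg (show ¬ target ≤ pyTotal arr (left + PySem.Int.floordiv (right - left) 2) from hchk)]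
    refine ih (by omega) h2 (by omega) ?_ h5
    intro u hu huv
    calc pyTotal arr u ≤ pyTotal arr mid := pyTotal_mono arr (by omega)
      _ < target := by omega
  | case3 left right hle =>
    intro h1 h2 h3 h4 h5
    rw [bsLoop]
    simp only [dif_neg hle]
    exact ⟨h1, by omega, h4, fun hlm => h5 left (by omega) hlm⟩

theorem altScan_isLeft (arr : List Int) (target mx : Int) :
    ∀ (rest : List Int) (pre lo : Int),
    (∀ y ∈ rest, y ∈ arr) → rest.Pairwise (· ≤ ·) →
    (∀ y ∈ arr, y ≤ mx) → (mx ∈ arr) →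
    1 ≤ lo →
    (∀ u, 1 ≤ u → u < lo → pyTotal arr u < target) →
    (∀ v, lo ≤ v → pyTotal arr v = pre + (rest.map (fun y => min v y)).sum) →
    (∀ y ∈ arr, y < lo ∨ y ∈ rest) →
    IsLeft arr target mx (max 1 (altScan target rest pre lo (rest.length : Int) (mx + 1))) := by
  intro rest
  induction rest with
  | nil =>
    intro pre lo _hsub _hpair _hmax hmem hlo hlt _htot hall
    have hmxlo : mx < lo := by
      rcases hall mx hmem with h | h
      · exact h
      · simp at h
    simp only [altScan]
    refine ⟨by omega, by omega, ?_, ?_⟩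
    · intro u hu huv
      exact hlt u hu (by omega)
    · intro hle
      omega
  | cons x t ih =>
    intro pre lo hsub hpair hmax hmem hlo hlt htot hall
    have hxarr : x ∈ arr := hsub x (by simp)
    have hxmx : x ≤ mx := hmax x hxarr
    have hk : (0:Int) < (((x :: t).length : Nat) : Int) := by
      simp only [List.length_cons]; push_cast; omega
    set k : Int := (((x :: t).length : Nat) : Int) with hkdef
    set need : Int := target - pre with hneed
    set c : Int := -(PySem.Int.floordiv (-need) k) with hc
    have hcb : (c - 1) * k < need ∧ need ≤ c * k :=
      (PySem.Int.neg_floordiv_neg_eq_iff_of_pos hk).mp rfl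
    set v : Int := max lo c with hv
    have hxt : ∀ y ∈ (x :: t), x ≤ y := by
      rcases List.pairwise_cons.mp hpair with ⟨hx, _⟩
      intro y hy
      rcases List.mem_cons.mp hy with h | h
      · omega
      · exact hx y h
    have hconst : ∀ u, lo ≤ u → u ≤ x → pyTotal arr u = pre + u * k := by
      intro u h1 h2
      rw [htot u h1, map_min_const _ _ (fun y hy => le_trans h2 (hxt y hy))]
    rw [show altScan target (x :: t) pre lo k (mx + 1)
        = if v ≤ x then v else altScan target t (pre + x) (max lo (x + 1)) (k - 1) (mx + 1)
        from rfl]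
    by_cases hvx : v ≤ x
    · rw [if_pos hvx]
      have hv1 : 1 ≤ v := le_trans hlo (le_max_left _ _)
      rw [show max 1 v = v by omega]
      refine ⟨hv1, by omega, ?_, ?_⟩
      · intro u hu huv
        by_cases hulo : u < lo
        · exact hlt u hu hulo
        · have h3 := hconst u (by omega) (by omega)
          have h4 : u * k ≤ (c - 1) * k :=
            mul_le_mul_of_nonneg_right (by omega) (by omega)
          omega
      · intro _
        have h3 := hconst v (le_max_left _ _) hvx
        have h4 : c * k ≤ v * k :=
          mul_le_mul_of_nonneg_right (le_max_right _ _) (by omega)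
        omega
    · rw [if_neg hvx]
      have hstep : ∀ u, lo ≤ u → u ≤ x → pyTotal arr u < target := by
        intro u h1 h2
        have h3 := hconst u h1 h2
        have h4 : u * k ≤ (c - 1) * k :=
          mul_le_mul_of_nonneg_right (by omega) (by omega)
        omega
      rw [show k - 1 = ((t.length : Nat) : Int) by
        simp only [hkdef, List.length_cons]; push_cast; ring]
      refine ih (pre + x) (max lo (x + 1)) (fun y hy => hsub y (by simp [hy]))
        (List.pairwise_cons.mp hpair).2 hmax hmem (by omega) ?_ ?_ ?_
      · intro u hu hult
        by_cases hulo : u < lo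
        · exact hlt u hu hulo
        · exact hstep u (by omega) (by omega)
      · intro w hw
        rw [htot w (by omega)]
        simp only [List.map_cons, List.sum_cons, List.length_cons]
        rw [min_eq_right (by omega : x ≤ w)]
        push_cast
        ring
      · intro y hy
        rcases hall y hy with h | h
        · left; omega
        · rcases List.mem_cons.mp h with h | h
          · left; omega
          · right; exact h

theorem le_getLast_of_pairwise (l : List Int) (hp : l.Pairwise (· ≤ ·)) :
    ∀ m, l.getLast? = some m → ∀ y ∈ l, y ≤ m := by
  induction l with
  | nil => simp
  | cons x t ih =>
    intro m hm y hy
    cases t with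
    | nil =>
      simp at hm hy
      omega
    | cons b t' =>
      have hm' : (b :: t').getLast? = some m := by simpa using hm
      rcases List.pairwise_cons.mp hp with ⟨hx, hp'⟩
      rcases List.mem_cons.mp hy with h | h
      · have hb : b ≤ m := ih hp' m hm' b (by simp)
        have hxb := hx b (by simp)
        omega
      · exact ih hp' m hm' y h

-- ===== VERDICT (by name: the statement is the Claim_ definition above) =====
theorem findBestValue_spec : Claim_equal_findBestValue := by
  intro arr target _hdom hpre
  replace hpre : arr ≠ [] := hpre
  unfold Spec_findBestValue findBestValue findBestValue_alt
  cases hmaxA : PySem.List.max? arr (fun x => x) with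
  | none => exact absurd ((PySem.List.max?_eq_none_iff arr _).mp hmaxA) hpre
  | some mx =>
  set s := PySem.List.sorted arr (fun x => x) false with hs
  have hperm : s.Perm arr := PySem.List.sorted_perm arr _ _
  have hsne : s ≠ [] := by
    intro h
    have := hperm.length_eq
    rw [h] at this
    exact hpre (List.length_eq_zero_iff.mp this.symm)
  have hget : PySem.List.pyGet? s (-1) = some (s.getLast hsne) := by
    rw [PySem.List.pyGet?_neg_one, List.getLast?_eq_some_getLast hsne]
  have hmx_max : ∀ y ∈ arr, y ≤ mx := fun y hy => PySem.List.max?_isMax hmaxA y hy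
  have hlast_eq : s.getLast hsne = mx := by
    have h1 : s.getLast hsne ≤ mx :=
      hmx_max _ (hperm.mem_iff.mp (List.getLast_mem hsne))
    have h2 : mx ≤ s.getLast hsne := by
      refine le_getLast_of_pairwise s ?_ _ (List.getLast?_eq_some_getLast hsne) mx ?_
      · exact PySem.List.sorted_pairwise arr (fun x => x)
      · exact hperm.mem_iff.mpr (PySem.List.max?_mem hmaxA)
    omega
  have hA : IsLeft arr target mx (bsLoop arr target 1 mx) :=
    bsLoop_isLeft arr target mx hmx_max 1 mx (le_refl 1) (le_refl mx) (by omega)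
      (fun u hu hu2 => absurd hu2 (by omega))
      (fun u hu hu2 => absurd hu (by omega))
  have hB : IsLeft arr target mx (max 1 (altScan target s 0 1 (s.length : Int) (mx + 1))) := by
    refine altScan_isLeft arr target mx s 0 1
      (fun y hy => (PySem.List.mem_sorted arr _ _ y).mp hy)
      (PySem.List.sorted_pairwise arr (fun x => x))
      hmx_max
      (PySem.List.max?_mem hmaxA)
      (le_refl 1)
      (fun u hu hlt => absurd hu (by omega))
      ?_
      (fun y hy => Or.inr ((PySem.List.mem_sorted arr _ _ y).mpr hy))
    intro v _
    rw [← pyTotal_perm hperm v, pyTotal_eq_map_sum]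
    ring
  have hleft := IsLeft_unique hA hB
  have htotEq : ∀ w, altTot s ((s.length : Nat) : Int) w = pyTotal arr w :=
    fun w => (altTot_eq s w).trans (pyTotal_perm hperm w)
  simp only [hget, hlast_eq, htotEq, ← hleft]
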